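-- pv_equiv track=rewrite | github.com/oneKn8/nightshift | nightshift/compression/summarizer.py | _extractive_summarize
-- ===== SOURCE A (Python) =====
-- def _extractive_summarize(text: str, max_length: int) -> str:
--     """Extractive fallback: take first N sentences."""
--     sentences = text.replace(". ", ".\n").split("\n")
--     result = []
--     total = 0
--     for s in sentences:
--         s = s.strip()
--         if not s:
--             continue
--         if total + len(s) > max_length * 4:
--             break
--         result.append(s)
--         total += len(s)
--     return " ".join(result) if result else text[:max_length * 4]
-- ===== SOURCE B (Python) =====
-- def _extractive_summarize(text: str, max_length: int) -> str:
--     """Extractive fallback: one fused char-scan state machine (no replace/split,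
--     no intermediate sentence list); emits sentences at '\n' or '. ' boundaries,
--     spending a remaining budget and building the output string directly."""
--     limit = max_length * 4
--     out = ""
--     budget = limit
--     buf = []
--     stopped = False
--
--     def consume(chars):
--         nonlocal out, budget, stopped
--         s = "".join(chars).strip()
--         if not s:
--             return
--         if len(s) > budget:
--             stopped = True
--             return
--         out = s if not out else out + " " + s
--         budget -= len(s)
--
--     i = 0
--     n = len(text)
--     while i < n and not stopped:
--         c = text[i]
--         if c == "\n":
--             consume(buf); buf = []; i += 1
--         elif c == "." and i + 1 < n and text[i + 1] == " ":
--             buf.append("."); consume(buf); buf = []; i += 2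
--         else:
--             buf.append(c); i += 1
--     if not stopped:
--         consume(buf)
--     return out if out else text[:limit]
-- ===== Notes on version B (the rewrite author's own statement) =====
-- stated objective: alternative
-- what changed: A pipelines string.replace + split into a sentence list and then greedily folds it; B is one fused character-level state machine that detects '\n'/'. ' boundaries itself with lookahead, keeps no sentence list at all, counts down a remaining budget and concatenates the output string directly.
import Mathlib
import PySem

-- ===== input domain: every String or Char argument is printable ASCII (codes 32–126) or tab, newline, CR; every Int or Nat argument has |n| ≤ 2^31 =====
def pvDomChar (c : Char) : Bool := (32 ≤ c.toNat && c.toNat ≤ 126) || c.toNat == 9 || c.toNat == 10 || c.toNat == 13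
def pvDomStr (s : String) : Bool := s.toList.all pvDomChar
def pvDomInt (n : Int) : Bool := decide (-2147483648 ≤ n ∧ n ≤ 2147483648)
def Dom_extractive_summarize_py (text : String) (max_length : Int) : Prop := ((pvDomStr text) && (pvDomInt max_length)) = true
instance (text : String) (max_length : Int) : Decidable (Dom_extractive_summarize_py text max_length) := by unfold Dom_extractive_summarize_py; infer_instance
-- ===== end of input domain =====

-- B replaces A's replace/split pipeline + greedy fold over a sentence list by ONE fused
-- character-level state machine (boundary lookahead, budget countdown, direct string building);
-- same cost, proved equal.

-- ===== PORT A =====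
-- A's loop: strip, skip empties, break on first overflow, else append and add.
def pvALoop (limit : Int) : List String → List String → Int → List String
  | [], result, _ => result
  | s :: rest, result, total =>
    let s' := PySem.Str.strip s
    if s' = "" then pvALoop limit rest result total
    else if total + PySem.Str.len s' > limit then result
    else pvALoop limit rest (result ++ [s']) (total + PySem.Str.len s')

def extractive_summarize_py (text : String) (max_length : Int) : String :=
  let sentences := (PySem.Str.split? (PySem.Str.replace text ". " ".\n") "\n").getD []
  let result := pvALoop (max_length * 4) sentences [] 0
  if result ≠ [] then PySem.Str.join " " result
  else PySem.Str.slice text none (some (max_length * 4))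

-- ===== PORT B =====
-- Source B's consume(): strip the buffered chars; skip if empty; none = the 'stopped' flag
-- (sentence too long for the remaining budget); else extend the output string and pay.
def pvConsume (raw : List Char) (out : String) (budget : Int) : Option (String × Int) :=
  let s := PySem.Str.strip (String.ofList raw)
  if s = "" then some (out, budget)
  else if PySem.Str.len s > budget then none
  else some ((if out = "" then s else out ++ " " ++ s), budget - PySem.Str.len s)

-- Source B's while-loop: scan the characters once, buffering the current sentence (buf is kept
-- reversed: raw order is buf.reverse), emitting it at '\n' or at '. ' (lookahead), stopping
-- for good when consume sets the stopped flag; the trailing buffer is consumed at the end.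
def pvScan : List Char → List Char → String → Int → String
  | [], buf, out, budget =>
    (match pvConsume buf.reverse out budget with
     | none => out
     | some (o, _) => o)
  | '\n' :: rest, buf, out, budget =>
    (match pvConsume buf.reverse out budget with
     | none => out
     | some (o, b) => pvScan rest [] o b)
  | '.' :: ' ' :: rest, buf, out, budget =>
    (match pvConsume (buf.reverse ++ ['.']) out budget with
     | none => out
     | some (o, b) => pvScan rest [] o b)
  | c :: rest, buf, out, budget => pvScan rest (c :: buf) out budget

def extractive_summarize_py_alt (text : String) (max_length : Int) : String :=
  let limit := max_length * 4
  let r := pvScan text.toList [] "" limit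
  if r ≠ "" then r else PySem.Str.slice text none (some limit)

-- ===== PRECONDITION & SPEC =====
def Spec_extractive_summarize_py (text : String) (max_length : Int) (out : String) : Prop := out = extractive_summarize_py_alt text max_length
instance (text : String) (max_length : Int) (out : String) : Decidable (Spec_extractive_summarize_py text max_length out) := by unfold Spec_extractive_summarize_py; infer_instance

-- ===== CLAIM (what is proved, stated in full; the proofs are below) =====
def Claim_equal_extractive_summarize_py : Prop := ∀ (text : String) (max_length : Int), Dom_extractive_summarize_py text max_length → Spec_extractive_summarize_py text max_length (extractive_summarize_py text max_length)

-- ===== LEMMAS AND PROOFS =====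

-- spec-side picture of text.replace(". ", ".\n")
def pvRepl : List Char → List Char
  | '.' :: ' ' :: t => '.' :: '\n' :: pvRepl t
  | c :: t => c :: pvRepl t
  | [] => []

-- spec-side picture of .split("\n") (cur = current piece, reversed)
def pvSplt : List Char → List Char → List (List Char)
  | [], cur => [cur.reverse]
  | '\n' :: t, cur => cur.reverse :: pvSplt t []
  | c :: t, cur => pvSplt t (c :: cur)

-- the fused tokenization both pipelines compute
def pvTok : List Char → List Char → List (List Char)
  | [], buf => [buf.reverse]
  | '\n' :: t, buf => buf.reverse :: pvTok t []
  | '.' :: ' ' :: t, buf => (buf.reverse ++ ['.']) :: pvTok t []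
  | c :: t, buf => pvTok t (c :: buf)

lemma pvRepl_cons (c : Char) (t : List Char) (h : ∀ p, c :: t ≠ '.' :: ' ' :: p) :
    pvRepl (c :: t) = c :: pvRepl t := by
  rw [pvRepl.eq_def]; split <;> simp_all

lemma pvSplt_cons (c : Char) (t cur : List Char) (h : c ≠ '\n') :
    pvSplt (c :: t) cur = pvSplt t (c :: cur) := by
  rw [pvSplt.eq_def]; split <;> simp_all

lemma pvTok_cons (c : Char) (t buf : List Char) (h1 : c ≠ '\n')
    (h2 : ∀ p, c :: t ≠ '.' :: ' ' :: p) :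
    pvTok (c :: t) buf = pvTok t (c :: buf) := by
  rw [pvTok.eq_def]; split <;> simp_all

lemma pvScan_cons (c : Char) (t buf : List Char) (out : String) (budget : Int)
    (h1 : c ≠ '\n') (h2 : ∀ p, c :: t ≠ '.' :: ' ' :: p) :
    pvScan (c :: t) buf out budget = pvScan t (c :: buf) out budget := by
  rw [pvScan.eq_def]; split <;> simp_all

lemma not_prefix_forall (c : Char) (t : List Char)
    (hp : ¬ (List.isPrefixOf ['.', ' '] (c :: t) = true)) :
    ∀ p, c :: t ≠ '.' :: ' ' :: p := by
  intro p e
  apply hp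
  rw [e]
  simp [List.isPrefixOf]

lemma replace_go_eq (fuel : Nat) : ∀ (l acc : List Char), l.length ≤ fuel →
    PySem.Chars.replace.go ['.', ' '] ['.', '\n'] fuel l acc = acc.reverse ++ pvRepl l := by
  induction fuel with
  | zero =>
    intro l acc h
    have hl : l = [] := List.eq_nil_of_length_eq_zero (Nat.le_zero.mp h)
    subst hl
    simp [PySem.Chars.replace.go, pvRepl]
  | succ fuel ih =>
    intro l acc h
    cases l with
    | nil => simp [PySem.Chars.replace.go, pvRepl]
    | cons c t =>
      by_cases hp : List.isPrefixOf ['.', ' '] (c :: t) = true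
      · have hpre : ['.', ' '] <+: c :: t := by
          simpa [← List.isPrefixOf_iff_prefix] using hp
        obtain ⟨r, hr⟩ := hpre
        rw [List.cons_append, List.cons_append, List.nil_append] at hr
        injection hr with h1 h2
        subst h1; subst h2
        simp only [PySem.Chars.replace.go]
        rw [if_pos hp]
        rw [show List.drop (List.length (['.', ' '] : List Char)) ('.' :: ' ' :: r) = r from by simp]
        rw [ih r (['.', '\n'].reverse ++ acc) (by simp at h; omega)]
        simp [pvRepl]
      · simp only [PySem.Chars.replace.go]
        rw [if_neg hp]
        rw [ih t (c :: acc) (by simp at h; omega)]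
        rw [pvRepl_cons c t (not_prefix_forall c t hp)]
        simp

lemma splitOn_go_eq (fuel : Nat) : ∀ (l cur : List Char) (acc : List (List Char)),
    l.length ≤ fuel →
    PySem.Chars.splitOn.go ['\n'] fuel l cur acc = acc.reverse ++ pvSplt l cur := by
  induction fuel with
  | zero =>
    intro l cur acc h
    have hl : l = [] := List.eq_nil_of_length_eq_zero (Nat.le_zero.mp h)
    subst hl
    simp [PySem.Chars.splitOn.go, pvSplt]
  | succ fuel ih =>
    intro l cur acc h
    cases l with
    | nil => simp [PySem.Chars.splitOn.go, pvSplt]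
    | cons c t =>
      simp only [PySem.Chars.splitOn.go]
      by_cases hc : c = '\n'
      · subst hc
        rw [if_pos (by simp [List.isPrefixOf])]
        rw [show List.drop (List.length (['\n'] : List Char)) ('\n' :: t) = t from by simp]
        rw [ih t [] (cur.reverse :: acc) (by simp at h; omega)]
        simp [pvSplt]
      · rw [if_neg (by simp [List.isPrefixOf]; exact fun e => hc e.symm)]
        rw [ih t (c :: cur) acc (by simp at h; omega)]
        rw [pvSplt_cons c t cur hc]

lemma splt_repl : ∀ (cs cur : List Char), pvSplt (pvRepl cs) cur = pvTok cs cur := by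
  intro cs cur
  induction cs, cur using pvTok.induct with
  | case1 buf => simp [pvRepl, pvSplt, pvTok]
  | case2 t buf ih =>
    rw [pvRepl_cons '\n' t (by intro p e; simp at e)]
    simp only [pvSplt, pvTok]
    rw [ih]
  | case3 t buf ih =>
    rw [show pvRepl ('.' :: ' ' :: t) = '.' :: '\n' :: pvRepl t from by simp [pvRepl]]
    rw [pvSplt_cons '.' ('\n' :: pvRepl t) buf (by decide)]
    simp only [pvSplt, pvTok]
    rw [ih]
    simp
  | case4 c t buf h1 h2 ih =>
    have hn : c ≠ '\n' := fun e => h1 e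
    have hcp : ∀ p, c :: t ≠ '.' :: ' ' :: p := by
      intro p e
      injection e with e1 e2
      exact h2 p e1 e2
    rw [pvRepl_cons c t hcp, pvSplt_cons c (pvRepl t) buf hn, ih, pvTok_cons c t buf hn hcp]

-- A's sentence list is exactly the fused tokenization
lemma sentences_eq (text : String) :
    (PySem.Str.split? (PySem.Str.replace text ". " ".\n") "\n").getD []
      = (pvTok text.toList []).map String.ofList := by
  have hrepl : (PySem.Str.replace text ". " ".\n").toList = pvRepl text.toList := by
    rw [PySem.Str.replace, String.toList_ofList]
    rw [show (". " : String).toList = ['.', ' '] from by decide]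
    rw [show (".\n" : String).toList = ['.', '\n'] from by decide]
    rw [PySem.Chars.replace]
    simp only [List.isEmpty_cons, Bool.false_eq_true, if_false]
    rw [replace_go_eq _ _ _ (le_refl _)]
    simp
  rw [PySem.Str.split?, PySem.Chars.split?]
  rw [show ("\n" : String).toList = ['\n'] from by decide]
  simp only [List.isEmpty_cons, Bool.false_eq_true, if_false]
  rw [PySem.Chars.splitOn]
  rw [splitOn_go_eq _ _ _ _ (by omega)]
  rw [hrepl, splt_repl]
  simp

-- joining helpers
def pvJoin' (res : List String) : String := if res = [] then "" else PySem.Str.join " " res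

lemma chars_join_snoc (w : List Char) : ∀ (xs : List (List Char)) (x s : List Char),
    PySem.Chars.join w (x :: (xs ++ [s])) = PySem.Chars.join w (x :: xs) ++ w ++ s := by
  intro xs
  induction xs with
  | nil =>
    intro x s
    rw [List.nil_append, PySem.Chars.join_cons_cons, PySem.Chars.join_singleton,
      PySem.Chars.join_singleton]
  | cons y r ih =>
    intro x s
    rw [List.cons_append, PySem.Chars.join_cons_cons, ih y s, PySem.Chars.join_cons_cons]
    simp [List.append_assoc]

lemma join'_snoc (res : List String) (s : String) :
    pvJoin' (res ++ [s]) = if res = [] then s else PySem.Str.join " " res ++ " " ++ s := by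
  cases res with
  | nil =>
    have h1 : PySem.Str.join " " [s] = s := by
      apply String.toList_inj.mp
      rw [PySem.Str.toList_join, List.map_cons, List.map_nil]
      exact PySem.Chars.join_singleton (" " : String).toList s.toList
    simp [pvJoin', h1]
  | cons a l =>
    have key : PySem.Str.join " " (a :: (l ++ [s])) = PySem.Str.join " " (a :: l) ++ " " ++ s := by
      apply String.toList_inj.mp
      rw [String.toList_append, String.toList_append, PySem.Str.toList_join, PySem.Str.toList_join]
      simp only [List.map_cons, List.map_append, List.map_nil]
      exact chars_join_snoc _ _ _ _
    simp [pvJoin', key]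

lemma join'_ne_empty (res : List String) (h : res ≠ []) (hs : ∀ s ∈ res, s ≠ "") :
    pvJoin' res ≠ "" := by
  cases res with
  | nil => exact absurd rfl h
  | cons a l =>
    simp only [pvJoin', if_neg (List.cons_ne_nil a l)]
    intro he
    have ha : a.toList ≠ [] := by
      intro e
      exact hs a (List.mem_cons_self) (String.toList_inj.mp (by simpa using e))
    have htl : (PySem.Str.join " " (a :: l)).toList = [] := by rw [he]; rfl
    rw [PySem.Str.toList_join] at htl
    cases l with
    | nil =>
      rw [List.map_cons, List.map_nil, PySem.Chars.join_singleton] at htl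
      exact ha htl
    | cons b r =>
      rw [List.map_cons, List.map_cons, PySem.Chars.join_cons_cons] at htl
      rw [List.append_assoc] at htl
      exact ha (List.append_eq_nil_iff.mp htl).1

lemma pvALoop_preserves (limit : Int) : ∀ (ss res : List String) (total : Int),
    (∀ s ∈ res, s ≠ "") → ∀ s ∈ pvALoop limit ss res total, s ≠ "" := by
  intro ss
  induction ss with
  | nil => intro res total h; simpa [pvALoop] using h
  | cons s rest ih =>
    intro res total h
    simp only [pvALoop]
    split_ifs with h1 h2
    · exact ih res total h
    · exact h
    · refine ih (res ++ [PySem.Str.strip s]) _ ?_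
      intro x hx
      rcases List.mem_append.mp hx with hx | hx
      · exact h x hx
      · simpa using (List.mem_singleton.mp hx) ▸ h1

-- one step of pvJoin' matches Source B's string extension
lemma join'_step (res : List String) (s : String) (hres : ∀ x ∈ res, x ≠ "") :
    (if pvJoin' res = "" then s else pvJoin' res ++ " " ++ s) = pvJoin' (res ++ [s]) := by
  rw [join'_snoc]
  by_cases hr : res = []
  · simp [hr, pvJoin']
  · rw [if_neg (join'_ne_empty res hr hres), if_neg hr]
    simp [pvJoin', hr]

lemma pvConsume_empty (raw : List Char) (out : String) (budget : Int)
    (h : PySem.Str.strip (String.ofList raw) = "") :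
    pvConsume raw out budget = some (out, budget) := by
  simp only [pvConsume]
  rw [if_pos h]

lemma pvConsume_stop (raw : List Char) (out : String) (budget : Int)
    (h1 : ¬ PySem.Str.strip (String.ofList raw) = "")
    (h2 : PySem.Str.len (PySem.Str.strip (String.ofList raw)) > budget) :
    pvConsume raw out budget = none := by
  simp only [pvConsume]
  rw [if_neg h1, if_pos h2]

lemma pvConsume_take (raw : List Char) (out : String) (budget : Int)
    (h1 : ¬ PySem.Str.strip (String.ofList raw) = "")
    (h2 : ¬ PySem.Str.len (PySem.Str.strip (String.ofList raw)) > budget) :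
    pvConsume raw out budget
      = some ((if out = "" then PySem.Str.strip (String.ofList raw)
               else out ++ " " ++ PySem.Str.strip (String.ofList raw)),
              budget - PySem.Str.len (PySem.Str.strip (String.ofList raw))) := by
  simp only [pvConsume]
  rw [if_neg h1, if_neg h2]

lemma pvALoop_skip (limit : Int) (s : String) (rest res : List String) (total : Int)
    (h : PySem.Str.strip s = "") :
    pvALoop limit (s :: rest) res total = pvALoop limit rest res total := by
  simp only [pvALoop]
  rw [if_pos h]

lemma pvALoop_stop (limit : Int) (s : String) (rest res : List String) (total : Int)
    (h1 : ¬ PySem.Str.strip s = "") (h2 : total + PySem.Str.len (PySem.Str.strip s) > limit) :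
    pvALoop limit (s :: rest) res total = res := by
  simp only [pvALoop]
  rw [if_neg h1, if_pos h2]

lemma pvALoop_take (limit : Int) (s : String) (rest res : List String) (total : Int)
    (h1 : ¬ PySem.Str.strip s = "") (h2 : ¬ total + PySem.Str.len (PySem.Str.strip s) > limit) :
    pvALoop limit (s :: rest) res total
      = pvALoop limit rest (res ++ [PySem.Str.strip s]) (total + PySem.Str.len (PySem.Str.strip s)) := by
  simp only [pvALoop]
  rw [if_neg h1, if_neg h2]

-- the core simulation: the fused scan computes A's fold over the tokenization
set_option maxHeartbeats 1000000 in
lemma scan_eq (limit : Int) : ∀ (cs buf : List Char), ∀ (res : List String) (total : Int),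
    (∀ s ∈ res, s ≠ "") →
    pvScan cs buf (pvJoin' res) (limit - total)
      = pvJoin' (pvALoop limit ((pvTok cs buf).map String.ofList) res total) := by
  intro cs buf
  induction cs, buf using pvTok.induct with
  | case1 buf =>
    intro res total hres
    simp only [pvScan, pvTok, List.map_cons, List.map_nil]
    by_cases h1 : PySem.Str.strip (String.ofList buf.reverse) = ""
    · rw [pvConsume_empty _ _ _ h1, pvALoop_skip _ _ _ _ _ h1]
      rfl
    · by_cases h2 : total + PySem.Str.len (PySem.Str.strip (String.ofList buf.reverse)) > limit
      · rw [pvConsume_stop _ _ _ h1 (by omega), pvALoop_stop _ _ _ _ _ h1 h2]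
      · rw [pvConsume_take _ _ _ h1 (by omega), pvALoop_take _ _ _ _ _ h1 h2]
        show (if pvJoin' res = "" then PySem.Str.strip (String.ofList buf.reverse)
               else pvJoin' res ++ " " ++ PySem.Str.strip (String.ofList buf.reverse))
            = pvJoin' (pvALoop limit [] (res ++ [PySem.Str.strip (String.ofList buf.reverse)]) _)
        rw [join'_step res _ hres]
        rfl
  | case2 t buf ih =>
    intro res total hres
    simp only [pvScan, pvTok, List.map_cons]
    by_cases h1 : PySem.Str.strip (String.ofList buf.reverse) = ""
    · rw [pvConsume_empty _ _ _ h1, pvALoop_skip _ _ _ _ _ h1]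
      exact ih res total hres
    · by_cases h2 : total + PySem.Str.len (PySem.Str.strip (String.ofList buf.reverse)) > limit
      · rw [pvConsume_stop _ _ _ h1 (by omega), pvALoop_stop _ _ _ _ _ h1 h2]
      · rw [pvConsume_take _ _ _ h1 (by omega), pvALoop_take _ _ _ _ _ h1 h2]
        show pvScan t [] (if pvJoin' res = "" then PySem.Str.strip (String.ofList buf.reverse)
               else pvJoin' res ++ " " ++ PySem.Str.strip (String.ofList buf.reverse))
              (limit - total - PySem.Str.len (PySem.Str.strip (String.ofList buf.reverse)))
            = _
        rw [join'_step res _ hres]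
        have hres' : ∀ x ∈ res ++ [PySem.Str.strip (String.ofList buf.reverse)], x ≠ "" := by
          intro x hx
          rcases List.mem_append.mp hx with hx | hx
          · exact hres x hx
          · simpa using (List.mem_singleton.mp hx) ▸ h1
        have step := ih (res ++ [PySem.Str.strip (String.ofList buf.reverse)])
          (total + PySem.Str.len (PySem.Str.strip (String.ofList buf.reverse))) hres'
        rw [show limit - (total + PySem.Str.len (PySem.Str.strip (String.ofList buf.reverse)))
            = limit - total - PySem.Str.len (PySem.Str.strip (String.ofList buf.reverse)) from by ring] at step
        exact step
  | case3 t buf ih =>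
    intro res total hres
    simp only [pvScan, pvTok, List.map_cons]
    by_cases h1 : PySem.Str.strip (String.ofList (buf.reverse ++ ['.'])) = ""
    · rw [pvConsume_empty _ _ _ h1, pvALoop_skip _ _ _ _ _ h1]
      exact ih res total hres
    · by_cases h2 : total + PySem.Str.len (PySem.Str.strip (String.ofList (buf.reverse ++ ['.']))) > limit
      · rw [pvConsume_stop _ _ _ h1 (by omega), pvALoop_stop _ _ _ _ _ h1 h2]
      · rw [pvConsume_take _ _ _ h1 (by omega), pvALoop_take _ _ _ _ _ h1 h2]
        show pvScan t [] (if pvJoin' res = "" then PySem.Str.strip (String.ofList (buf.reverse ++ ['.']))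
               else pvJoin' res ++ " " ++ PySem.Str.strip (String.ofList (buf.reverse ++ ['.'])))
              (limit - total - PySem.Str.len (PySem.Str.strip (String.ofList (buf.reverse ++ ['.']))))
            = _
        rw [join'_step res _ hres]
        have hres' : ∀ x ∈ res ++ [PySem.Str.strip (String.ofList (buf.reverse ++ ['.']))], x ≠ "" := by
          intro x hx
          rcases List.mem_append.mp hx with hx | hx
          · exact hres x hx
          · simpa using (List.mem_singleton.mp hx) ▸ h1
        have step := ih (res ++ [PySem.Str.strip (String.ofList (buf.reverse ++ ['.']))])
          (total + PySem.Str.len (PySem.Str.strip (String.ofList (buf.reverse ++ ['.'])))) hres'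
        rw [show limit - (total + PySem.Str.len (PySem.Str.strip (String.ofList (buf.reverse ++ ['.']))))
            = limit - total - PySem.Str.len (PySem.Str.strip (String.ofList (buf.reverse ++ ['.']))) from by ring] at step
        exact step
  | case4 c t buf h1 h2 ih =>
    intro res total hres
    have hn : c ≠ '\n' := fun e => h1 e
    have hcp : ∀ p, c :: t ≠ '.' :: ' ' :: p := by
      intro p e
      injection e with e1 e2
      exact h2 p e1 e2
    rw [pvScan_cons c t buf _ _ hn hcp, pvTok_cons c t buf hn hcp]
    exact ih res total hres

-- ===== VERDICT (by name: the statement is the Claim_ definition above) =====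
theorem extractive_summarize_py_spec : Claim_equal_extractive_summarize_py := by
  intro text max_length _
  unfold Spec_extractive_summarize_py extractive_summarize_py extractive_summarize_py_alt
  dsimp only
  rw [sentences_eq]
  have hmain := scan_eq (max_length * 4) text.toList [] [] 0 (by intro s hs; cases hs)
  rw [sub_zero, show pvJoin' ([] : List String) = "" from rfl] at hmain
  rw [hmain]
  by_cases hres : pvALoop (max_length * 4) ((pvTok text.toList []).map String.ofList) [] 0 = []
  · simp [hres, pvJoin']
  · have hne := join'_ne_empty _ hres
      (pvALoop_preserves _ _ _ _ (by intro s hs; cases hs))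
    simp only [pvJoin', if_neg hres] at hne ⊢
    rw [if_pos hne, if_pos hres]
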